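-- pv_equiv track=rewrite | github.com/tamirat-wubie/mullu-control-plane | mcoi/mcoi_runtime/core/connectivity_compliance.py | _scrub_pii
-- ===== SOURCE A (Python) =====
-- from typing import Any, Mapping
--
-- def _scrub_pii(data: dict[str, Any]) -> dict[str, Any]:
--     """Basic PII scrubbing — replace common PII-like patterns."""
--     pii_keys = ("email", "phone", "ssn", "social_security",
--                 "credit_card", "account_number", "date_of_birth")
--     result = dict(data)
--     for key in pii_keys:
--         if key in result:
--             result[key] = "[PII_SCRUBBED]"
--     return result
-- ===== SOURCE B (Python) =====
-- def _is_pii_key(key):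
--     return (key == "email" or key == "phone" or key == "ssn"
--             or key == "social_security" or key == "credit_card"
--             or key == "account_number" or key == "date_of_birth")
--
-- def _scrub_pii(data):
--     """Basic PII scrubbing — replace common PII-like patterns."""
--     result = {}
--     for key, value in data.items():
--         if _is_pii_key(key):
--             result[key] = "[PII_SCRUBBED]"
--         else:
--             result[key] = value
--     return result
-- ===== Notes on version B (the rewrite author's own statement) =====
-- stated objective: alternative
-- what changed: Instead of copying the whole dict and then patching it by probing each of the seven fixed PII keys, B builds a fresh dict in one forward pass over data.items(), deciding each entry with an explicit key predicate.
import Mathlib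
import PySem

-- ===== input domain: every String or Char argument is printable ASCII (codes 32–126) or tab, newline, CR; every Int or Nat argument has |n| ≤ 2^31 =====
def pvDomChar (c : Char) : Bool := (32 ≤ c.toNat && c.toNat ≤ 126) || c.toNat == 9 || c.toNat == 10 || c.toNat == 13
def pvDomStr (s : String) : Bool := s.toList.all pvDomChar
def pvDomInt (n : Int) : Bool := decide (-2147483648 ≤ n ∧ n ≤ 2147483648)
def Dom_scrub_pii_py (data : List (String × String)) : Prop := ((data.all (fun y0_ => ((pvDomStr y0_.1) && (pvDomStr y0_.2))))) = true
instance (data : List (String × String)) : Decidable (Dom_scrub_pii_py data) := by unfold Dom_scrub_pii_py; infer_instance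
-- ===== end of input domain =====

-- B replaces A's copy-then-patch loop over the fixed PII-key tuple by a single
-- forward pass building a fresh dict, with an explicit key predicate (objective: alternative).

-- ===== PORT A =====
-- the fixed tuple of PII keys from A
def scrubPiiKeys : List String :=
  ["email", "phone", "ssn", "social_security",
   "credit_card", "account_number", "date_of_birth"]

-- result = dict(data)  (copy of the dict); then for each pii key, if present, overwrite
def scrub_pii_py (data : List (String × String)) : List (String × String) :=
  let result : PySem.Dict String String := PySem.Dict.mk data
  (scrubPiiKeys.foldl
    (fun r k => if r.contains k then r.insert k "[PII_SCRUBBED]" else r)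
    result).items

-- ===== PORT B =====
-- B's key predicate: an explicit disjunction of equality tests
def isPiiKey (key : String) : Bool :=
  key == "email" || key == "phone" || key == "ssn"
    || key == "social_security" || key == "credit_card"
    || key == "account_number" || key == "date_of_birth"

-- build the fresh result entry by entry (B's loop as structural recursion)
def scrub_pii_py_alt : List (String × String) → List (String × String)
  | [] => []
  | (key, value) :: rest =>
      (if isPiiKey key then (key, "[PII_SCRUBBED]") else (key, value))
        :: scrub_pii_py_alt rest

-- ===== PRECONDITION & SPEC =====
def Spec_scrub_pii_py (data : List (String × String)) (out : List (String × String)) : Prop := out = scrub_pii_py_alt data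
instance (data : List (String × String)) (out : List (String × String)) : Decidable (Spec_scrub_pii_py data out) := by unfold Spec_scrub_pii_py; infer_instance

-- ===== CLAIM (what is proved, stated in full; the proofs are below) =====
def Claim_equal_scrub_pii_py : Prop := ∀ (data : List (String × String)), Dom_scrub_pii_py data → Spec_scrub_pii_py data (scrub_pii_py data)

-- ===== LEMMAS AND PROOFS =====

-- one patch step on a dict given as a literal item list rewrites exactly the entries at key k
theorem scrub_step_mk (k : String) (l : List (String × String)) :
    (if (PySem.Dict.mk l).contains k
       then (PySem.Dict.mk l).insert k "[PII_SCRUBBED]"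
       else PySem.Dict.mk l)
    = PySem.Dict.mk (l.map (fun kv => if kv.1 = k then (kv.1, "[PII_SCRUBBED]") else kv)) := by
  by_cases hc : (PySem.Dict.mk l).contains k = true
  · rw [if_pos hc]
    apply PySem.Dict.ext
    rw [PySem.Dict.items_insert_of_contains _ _ hc]
    show l.map _ = l.map _
    apply List.map_congr_left
    intro kv _
    by_cases hk : kv.1 = k
    · simp [hk]
    · simp [hk, beq_iff_eq]
  · rw [if_neg hc]
    have hmem : k ∉ (PySem.Dict.mk l).keys := by
      intro hmemk
      exact hc ((PySem.Dict.contains_iff_mem_keys _ _).mpr hmemk)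
    simp only [PySem.Dict.keys] at hmem
    have hid : ∀ kv ∈ l, (fun kv : String × String =>
        if kv.1 = k then (kv.1, "[PII_SCRUBBED]") else kv) kv = kv := by
      intro kv hkv
      have hne : kv.1 ≠ k := by
        intro he
        exact hmem (he ▸ List.mem_map_of_mem hkv)
      simp [hne]
    rw [List.map_congr_left hid]
    simp

-- folding the patch loop over any key list equals a single scrubbing map
theorem scrub_fold (ks : List String) (l : List (String × String)) :
    (ks.foldl (fun r k => if r.contains k then r.insert k "[PII_SCRUBBED]" else r)
      (PySem.Dict.mk l)).items
    = l.map (fun kv => (kv.1, if kv.1 ∈ ks then "[PII_SCRUBBED]" else kv.2)) := by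
  induction ks generalizing l with
  | nil => simp
  | cons k ks ih =>
    rw [List.foldl_cons, scrub_step_mk, ih, List.map_map]
    apply List.map_congr_left
    intro kv _
    by_cases hk : kv.1 = k <;> by_cases hks : kv.1 ∈ ks <;>
      simp [Function.comp, hk, hks]

-- B's predicate decides exactly membership in A's key tuple
theorem isPiiKey_iff_mem (x : String) : isPiiKey x = true ↔ x ∈ scrubPiiKeys := by
  simp [isPiiKey, scrubPiiKeys, or_assoc]

-- B's recursion is the same single scrubbing map
theorem alt_eq_map (l : List (String × String)) :
    scrub_pii_py_alt l
      = l.map (fun kv => (kv.1, if kv.1 ∈ scrubPiiKeys then "[PII_SCRUBBED]" else kv.2)) := by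
  induction l with
  | nil => rfl
  | cons kv rest ih =>
    cases kv with
    | mk k v =>
      simp only [scrub_pii_py_alt, List.map_cons, ih]
      by_cases h : k ∈ scrubPiiKeys
      · simp [(isPiiKey_iff_mem k).mpr h, h]
      · have : isPiiKey k = false := by
          cases hb : isPiiKey k
          · rfl
          · exact absurd ((isPiiKey_iff_mem k).mp hb) h
        simp [this, h]

-- ===== VERDICT (by name: the statement is the Claim_ definition above) =====
theorem scrub_pii_py_spec : Claim_equal_scrub_pii_py := by
  intro data _
  show scrub_pii_py data = scrub_pii_py_alt data
  unfold scrub_pii_py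
  rw [scrub_fold, alt_eq_map]
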